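-- pv_equiv track=rewrite | github.com/v3nom-95/reai | app.py | get_medical_advice
-- ===== SOURCE A (Python) =====
-- def get_medical_advice(msg: str) -> str:
--     m = msg.lower()
--     if any(k in m for k in ["fever", "temperature", "feverish"]):
--         return ("For fever: rest, stay hydrated, and use OTC fever reducers like "
--                 "acetaminophen. If temperature exceeds 103°F or persists beyond "
--                 "3 days, seek immediate medical attention.")
--     if any(k in m for k in ["headache", "migraine", "head pain"]):
--         return ("For headaches: rest in a dark quiet room, apply a cold compress, "
--                 "and stay hydrated. Severe or sudden headaches warrant a doctor visit.")
--     if any(k in m for k in ["cough", "coughing"]):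
--         return ("For cough: stay hydrated, try honey in warm water. Persistent cough "
--                 "over 2 weeks or coughing blood requires medical evaluation.")
--     if any(k in m for k in ["sore throat", "throat pain"]):
--         return ("For sore throat: gargle warm salt water, stay hydrated, use lozenges. "
--                 "If it lasts over a week with fever, see a doctor.")
--     if any(k in m for k in ["chest pain", "heart", "palpitation"]):
--         return ("EMERGENCY: Chest pain may indicate a cardiac event. "
--                 "Call 911 immediately. Do not drive yourself.")
--     if any(k in m for k in ["anxiety", "stress", "panic"]):
--         return ("For anxiety: practice deep breathing and mindfulness. "
--                 "If overwhelming or persistent, consult a mental health professional.")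
--     if any(k in m for k in ["diabetes", "blood sugar", "glucose"]):
--         return ("For diabetes: monitor blood sugar regularly, follow your prescribed "
--                 "diet and medications. Consult your endocrinologist regularly.")
--     if any(k in m for k in ["cold", "flu", "runny nose", "congestion"]):
--         return ("For cold/flu: rest, fluids, saline sprays. See a doctor if symptoms "
--                 "worsen or last over 10 days.")
--     if any(k in m for k in ["stomach", "nausea", "vomit", "diarrhea"]):
--         return ("For GI symptoms: sip clear fluids, rest. Seek help if symptoms "
--                 "persist over 48 hours or include blood.")
--     if any(k in m for k in ["sleep", "insomnia"]):
--         return ("For sleep issues: maintain a consistent schedule, avoid screens "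
--                 "before bed. Persistent insomnia warrants a doctor visit.")
--     if any(k in m for k in ["allergy", "rash", "hives", "itchy"]):
--         return ("For allergies/rash: avoid triggers, use antihistamines. "
--                 "Severe reactions with throat swelling need emergency care.")
--     return ("I'm a responsible medical assistant. For specific symptoms, please "
--             "consult a qualified healthcare professional. I cannot provide "
--             "personalised medical diagnoses.")
-- ===== SOURCE B (Python) =====
-- # Flat inverted index keyword -> category number; collect ALL matching
-- # categories exhaustively, then pick the highest-priority (smallest) one.
-- _KEYWORD_INDEX = {
--     "fever": 0, "temperature": 0, "feverish": 0,
--     "headache": 1, "migraine": 1, "head pain": 1,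
--     "cough": 2, "coughing": 2,
--     "sore throat": 3, "throat pain": 3,
--     "chest pain": 4, "heart": 4, "palpitation": 4,
--     "anxiety": 5, "stress": 5, "panic": 5,
--     "diabetes": 6, "blood sugar": 6, "glucose": 6,
--     "cold": 7, "flu": 7, "runny nose": 7, "congestion": 7,
--     "stomach": 8, "nausea": 8, "vomit": 8, "diarrhea": 8,
--     "sleep": 9, "insomnia": 9,
--     "allergy": 10, "rash": 10, "hives": 10, "itchy": 10,
-- }
--
-- _ADVICE = [
--     ("For fever: rest, stay hydrated, and use OTC fever reducers like "
--      "acetaminophen. If temperature exceeds 103\u00b0F or persists beyond "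
--      "3 days, seek immediate medical attention."),
--     ("For headaches: rest in a dark quiet room, apply a cold compress, "
--      "and stay hydrated. Severe or sudden headaches warrant a doctor visit."),
--     ("For cough: stay hydrated, try honey in warm water. Persistent cough "
--      "over 2 weeks or coughing blood requires medical evaluation."),
--     ("For sore throat: gargle warm salt water, stay hydrated, use lozenges. "
--      "If it lasts over a week with fever, see a doctor."),
--     ("EMERGENCY: Chest pain may indicate a cardiac event. "
--      "Call 911 immediately. Do not drive yourself."),
--     ("For anxiety: practice deep breathing and mindfulness. "
--      "If overwhelming or persistent, consult a mental health professional."),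
--     ("For diabetes: monitor blood sugar regularly, follow your prescribed "
--      "diet and medications. Consult your endocrinologist regularly."),
--     ("For cold/flu: rest, fluids, saline sprays. See a doctor if symptoms "
--      "worsen or last over 10 days."),
--     ("For GI symptoms: sip clear fluids, rest. Seek help if symptoms "
--      "persist over 48 hours or include blood."),
--     ("For sleep issues: maintain a consistent schedule, avoid screens "
--      "before bed. Persistent insomnia warrants a doctor visit."),
--     ("For allergies/rash: avoid triggers, use antihistamines. "
--      "Severe reactions with throat swelling need emergency care."),
-- ]
--
-- _DEFAULT_ADVICE = ("I'm a responsible medical assistant. For specific symptoms, please "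
--                    "consult a qualified healthcare professional. I cannot provide "
--                    "personalised medical diagnoses.")
--
--
-- def get_medical_advice(msg: str) -> str:
--     m = msg.lower()
--     matches = [i for k, i in _KEYWORD_INDEX.items() if k in m]
--     if matches:
--         return _ADVICE[min(matches)]
--     return _DEFAULT_ADVICE
-- ===== Notes on version B (the rewrite author's own statement) =====
-- stated objective: alternative
-- what changed: Replaced the sequential short-circuiting if-chain by a flat inverted keyword-to-category index: B exhaustively collects every matching category and returns the advice of the minimal (highest-priority) matched index, no per-branch control flow.
import Mathlib
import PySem

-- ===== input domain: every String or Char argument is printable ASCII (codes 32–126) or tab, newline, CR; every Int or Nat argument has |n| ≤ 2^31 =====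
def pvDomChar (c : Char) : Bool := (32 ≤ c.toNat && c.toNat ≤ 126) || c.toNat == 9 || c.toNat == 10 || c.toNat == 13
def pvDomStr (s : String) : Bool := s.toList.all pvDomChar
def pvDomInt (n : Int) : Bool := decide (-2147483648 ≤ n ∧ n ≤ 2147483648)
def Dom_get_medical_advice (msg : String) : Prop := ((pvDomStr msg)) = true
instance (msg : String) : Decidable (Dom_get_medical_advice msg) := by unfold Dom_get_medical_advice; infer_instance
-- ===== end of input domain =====

-- B replaces A's short-circuiting if-chain by a flat inverted keyword→category index:
-- it collects ALL matching categories and returns the advice of the minimal matched index.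

-- ===== PORT A =====
def get_medical_advice (msg : String) : String :=
  let m := PySem.Str.lower msg
  if (["fever", "temperature", "feverish"]).any (fun k => PySem.Str.isIn k m) then
    "For fever: rest, stay hydrated, and use OTC fever reducers like acetaminophen. If temperature exceeds 103°F or persists beyond 3 days, seek immediate medical attention."
  else
  if (["headache", "migraine", "head pain"]).any (fun k => PySem.Str.isIn k m) then
    "For headaches: rest in a dark quiet room, apply a cold compress, and stay hydrated. Severe or sudden headaches warrant a doctor visit."
  else
  if (["cough", "coughing"]).any (fun k => PySem.Str.isIn k m) then
    "For cough: stay hydrated, try honey in warm water. Persistent cough over 2 weeks or coughing blood requires medical evaluation."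
  else
  if (["sore throat", "throat pain"]).any (fun k => PySem.Str.isIn k m) then
    "For sore throat: gargle warm salt water, stay hydrated, use lozenges. If it lasts over a week with fever, see a doctor."
  else
  if (["chest pain", "heart", "palpitation"]).any (fun k => PySem.Str.isIn k m) then
    "EMERGENCY: Chest pain may indicate a cardiac event. Call 911 immediately. Do not drive yourself."
  else
  if (["anxiety", "stress", "panic"]).any (fun k => PySem.Str.isIn k m) then
    "For anxiety: practice deep breathing and mindfulness. If overwhelming or persistent, consult a mental health professional."
  else
  if (["diabetes", "blood sugar", "glucose"]).any (fun k => PySem.Str.isIn k m) then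
    "For diabetes: monitor blood sugar regularly, follow your prescribed diet and medications. Consult your endocrinologist regularly."
  else
  if (["cold", "flu", "runny nose", "congestion"]).any (fun k => PySem.Str.isIn k m) then
    "For cold/flu: rest, fluids, saline sprays. See a doctor if symptoms worsen or last over 10 days."
  else
  if (["stomach", "nausea", "vomit", "diarrhea"]).any (fun k => PySem.Str.isIn k m) then
    "For GI symptoms: sip clear fluids, rest. Seek help if symptoms persist over 48 hours or include blood."
  else
  if (["sleep", "insomnia"]).any (fun k => PySem.Str.isIn k m) then
    "For sleep issues: maintain a consistent schedule, avoid screens before bed. Persistent insomnia warrants a doctor visit."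
  else
  if (["allergy", "rash", "hives", "itchy"]).any (fun k => PySem.Str.isIn k m) then
    "For allergies/rash: avoid triggers, use antihistamines. Severe reactions with throat swelling need emergency care."
  else
  "I'm a responsible medical assistant. For specific symptoms, please consult a qualified healthcare professional. I cannot provide personalised medical diagnoses."

-- ===== PORT B =====
-- flat inverted index keyword → category number (Python dict, insertion order)
def pvKeywordIndex : List (String × Nat) :=
  [("fever", 0), ("temperature", 0), ("feverish", 0),
   ("headache", 1), ("migraine", 1), ("head pain", 1),
   ("cough", 2), ("coughing", 2),
   ("sore throat", 3), ("throat pain", 3),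
   ("chest pain", 4), ("heart", 4), ("palpitation", 4),
   ("anxiety", 5), ("stress", 5), ("panic", 5),
   ("diabetes", 6), ("blood sugar", 6), ("glucose", 6),
   ("cold", 7), ("flu", 7), ("runny nose", 7), ("congestion", 7),
   ("stomach", 8), ("nausea", 8), ("vomit", 8), ("diarrhea", 8),
   ("sleep", 9), ("insomnia", 9),
   ("allergy", 10), ("rash", 10), ("hives", 10), ("itchy", 10)]

def pvAdvice : List String :=
  ["For fever: rest, stay hydrated, and use OTC fever reducers like acetaminophen. If temperature exceeds 103°F or persists beyond 3 days, seek immediate medical attention.",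
   "For headaches: rest in a dark quiet room, apply a cold compress, and stay hydrated. Severe or sudden headaches warrant a doctor visit.",
   "For cough: stay hydrated, try honey in warm water. Persistent cough over 2 weeks or coughing blood requires medical evaluation.",
   "For sore throat: gargle warm salt water, stay hydrated, use lozenges. If it lasts over a week with fever, see a doctor.",
   "EMERGENCY: Chest pain may indicate a cardiac event. Call 911 immediately. Do not drive yourself.",
   "For anxiety: practice deep breathing and mindfulness. If overwhelming or persistent, consult a mental health professional.",
   "For diabetes: monitor blood sugar regularly, follow your prescribed diet and medications. Consult your endocrinologist regularly.",
   "For cold/flu: rest, fluids, saline sprays. See a doctor if symptoms worsen or last over 10 days.",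
   "For GI symptoms: sip clear fluids, rest. Seek help if symptoms persist over 48 hours or include blood.",
   "For sleep issues: maintain a consistent schedule, avoid screens before bed. Persistent insomnia warrants a doctor visit.",
   "For allergies/rash: avoid triggers, use antihistamines. Severe reactions with throat swelling need emergency care."]

def pvDefaultAdvice : String := "I'm a responsible medical assistant. For specific symptoms, please consult a qualified healthcare professional. I cannot provide personalised medical diagnoses."

-- the per-keyword match extractor (the dict-comprehension filter of Source B)
def pvF (m : String) : String × Nat → Option Nat :=
  fun p => if PySem.Str.isIn p.1 m then some p.2 else none

def get_medical_advice_alt (msg : String) : String :=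
  let m := PySem.Str.lower msg
  let hits := pvKeywordIndex.filterMap (pvF m)
  match PySem.List.min? hits (fun x => x) with
  | some i => pvAdvice.getD i pvDefaultAdvice
  | none => pvDefaultAdvice

-- ===== PRECONDITION & SPEC =====
def Spec_get_medical_advice (msg : String) (out : String) : Prop := out = get_medical_advice_alt msg
instance (msg : String) (out : String) : Decidable (Spec_get_medical_advice msg out) := by unfold Spec_get_medical_advice; infer_instance

-- ===== CLAIM =====
def Claim_equal_get_medical_advice : Prop := ∀ (msg : String), Dom_get_medical_advice msg → Spec_get_medical_advice msg (get_medical_advice msg)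

-- ===== LEMMAS AND PROOFS =====

-- a keyword group: the keywords of one category, paired with its index
def pvGrp (ks : List String) (i : Nat) : List (String × Nat) := ks.map (fun k => (k, i))

lemma pvGrpHead (m : String) (ks : List String) (i : Nat) :
    ((pvGrp ks i).filterMap (pvF m)).head? =
      if ks.any (fun k => PySem.Str.isIn k m) then some i else none := by
  induction ks with
  | nil => rfl
  | cons k t ih =>
    rcases Bool.eq_false_or_eq_true (PySem.Str.isIn k m) with h | h
    · rw [pvGrp, List.map_cons,
          List.filterMap_cons_some (show pvF m (k, i) = some i by
            show (if PySem.Str.isIn k m = true then some i else none) = some i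
            rw [if_pos h]),
          List.head?_cons, List.any_cons, h, Bool.true_or, if_pos rfl]
    · rw [pvGrp, List.map_cons,
          List.filterMap_cons_none (show pvF m (k, i) = none by
            show (if PySem.Str.isIn k m = true then some i else none) = none
            rw [if_neg (by rw [h]; exact Bool.false_ne_true)]),
          show List.map (fun k => (k, i)) t = pvGrp t i from rfl, ih,
          List.any_cons, h, Bool.false_or]

lemma pvFilterMap_eq (m : String) (l : List (String × Nat)) :
    l.filterMap (pvF m) = (l.filter (fun p => PySem.Str.isIn p.1 m)).map Prod.snd := by
  induction l with
  | nil => rfl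
  | cons p t ih =>
    rcases Bool.eq_false_or_eq_true (PySem.Str.isIn p.1 m) with h | h
    · rw [List.filterMap_cons_some (show pvF m p = some p.2 by
            show (if PySem.Str.isIn p.1 m = true then some p.2 else none) = some p.2
            rw [if_pos h]),
          List.filter_cons_of_pos (p := fun q : String × Nat => PySem.Str.isIn q.1 m) h, List.map_cons, ih]
    · rw [List.filterMap_cons_none (show pvF m p = none by
            show (if PySem.Str.isIn p.1 m = true then some p.2 else none) = none
            rw [if_neg (by rw [h]; exact Bool.false_ne_true)]),
          List.filter_cons_of_neg (p := fun q : String × Nat => PySem.Str.isIn q.1 m)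
            (by intro hx
                rw [show ((fun q : String × Nat => PySem.Str.isIn q.1 m) p) = PySem.Str.isIn p.1 m from rfl, h] at hx
                exact Bool.false_ne_true hx), ih]

lemma pvMatchesSorted (m : String) :
    (pvKeywordIndex.filterMap (pvF m)).Pairwise (· ≤ ·) := by
  rw [pvFilterMap_eq]
  have hsub : ((pvKeywordIndex.filter (fun p => PySem.Str.isIn p.1 m)).map Prod.snd).Sublist
      (pvKeywordIndex.map Prod.snd) := List.filter_sublist.map _
  have hpw : (pvKeywordIndex.map Prod.snd).Pairwise (· ≤ ·) := by decide
  exact hpw.sublist hsub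

lemma pvFoldlMin (t : List Nat) : ∀ x : Nat, (∀ y ∈ t, x ≤ y) → t.foldl min x = x := by
  induction t with
  | nil => intro x _; rfl
  | cons a t ih =>
    intro x h
    simp only [List.foldl_cons]
    rw [Nat.min_eq_left (h a (List.mem_cons_self ..))]
    exact ih x (fun y hy => h y (List.mem_cons_of_mem _ hy))

lemma pvMinEqHead (l : List Nat) (h : l.Pairwise (· ≤ ·)) :
    PySem.List.min? l (fun x => x) = l.head? := by
  cases l with
  | nil => rfl
  | cons x t =>
    rw [PySem.List.min?_id_cons, List.head?_cons]
    rw [pvFoldlMin t x (by simpa using (List.pairwise_cons.mp h).1)]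

lemma pvIndexSplit : pvKeywordIndex =
    pvGrp ["fever", "temperature", "feverish"] 0 ++
    pvGrp ["headache", "migraine", "head pain"] 1 ++
    pvGrp ["cough", "coughing"] 2 ++
    pvGrp ["sore throat", "throat pain"] 3 ++
    pvGrp ["chest pain", "heart", "palpitation"] 4 ++
    pvGrp ["anxiety", "stress", "panic"] 5 ++
    pvGrp ["diabetes", "blood sugar", "glucose"] 6 ++
    pvGrp ["cold", "flu", "runny nose", "congestion"] 7 ++
    pvGrp ["stomach", "nausea", "vomit", "diarrhea"] 8 ++
    pvGrp ["sleep", "insomnia"] 9 ++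
    pvGrp ["allergy", "rash", "hives", "itchy"] 10 := by rfl

lemma pvHeadChar (m : String) :
    (pvKeywordIndex.filterMap (pvF m)).head? =
      if (["fever", "temperature", "feverish"]).any (fun k => PySem.Str.isIn k m) then some 0 else
      if (["headache", "migraine", "head pain"]).any (fun k => PySem.Str.isIn k m) then some 1 else
      if (["cough", "coughing"]).any (fun k => PySem.Str.isIn k m) then some 2 else
      if (["sore throat", "throat pain"]).any (fun k => PySem.Str.isIn k m) then some 3 else
      if (["chest pain", "heart", "palpitation"]).any (fun k => PySem.Str.isIn k m) then some 4 else
      if (["anxiety", "stress", "panic"]).any (fun k => PySem.Str.isIn k m) then some 5 else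
      if (["diabetes", "blood sugar", "glucose"]).any (fun k => PySem.Str.isIn k m) then some 6 else
      if (["cold", "flu", "runny nose", "congestion"]).any (fun k => PySem.Str.isIn k m) then some 7 else
      if (["stomach", "nausea", "vomit", "diarrhea"]).any (fun k => PySem.Str.isIn k m) then some 8 else
      if (["sleep", "insomnia"]).any (fun k => PySem.Str.isIn k m) then some 9 else
      if (["allergy", "rash", "hives", "itchy"]).any (fun k => PySem.Str.isIn k m) then some 10 else none := by
  rw [pvIndexSplit]
  simp only [List.filterMap_append, List.head?_append, pvGrpHead]
  by_cases g0 : (["fever", "temperature", "feverish"]).any (fun k => PySem.Str.isIn k m) = true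
  · rw [if_pos g0]; try rw [if_pos g0]
    simp only [Option.some_or]
  rw [if_neg g0]; try rw [if_neg g0]
  by_cases g1 : (["headache", "migraine", "head pain"]).any (fun k => PySem.Str.isIn k m) = true
  · rw [if_pos g1]; try rw [if_pos g1]
    simp only [Option.none_or, Option.some_or]
  rw [if_neg g1]; try rw [if_neg g1]
  by_cases g2 : (["cough", "coughing"]).any (fun k => PySem.Str.isIn k m) = true
  · rw [if_pos g2]; try rw [if_pos g2]
    simp only [Option.none_or, Option.some_or]
  rw [if_neg g2]; try rw [if_neg g2]
  by_cases g3 : (["sore throat", "throat pain"]).any (fun k => PySem.Str.isIn k m) = true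
  · rw [if_pos g3]; try rw [if_pos g3]
    simp only [Option.none_or, Option.some_or]
  rw [if_neg g3]; try rw [if_neg g3]
  by_cases g4 : (["chest pain", "heart", "palpitation"]).any (fun k => PySem.Str.isIn k m) = true
  · rw [if_pos g4]; try rw [if_pos g4]
    simp only [Option.none_or, Option.some_or]
  rw [if_neg g4]; try rw [if_neg g4]
  by_cases g5 : (["anxiety", "stress", "panic"]).any (fun k => PySem.Str.isIn k m) = true
  · rw [if_pos g5]; try rw [if_pos g5]
    simp only [Option.none_or, Option.some_or]
  rw [if_neg g5]; try rw [if_neg g5]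
  by_cases g6 : (["diabetes", "blood sugar", "glucose"]).any (fun k => PySem.Str.isIn k m) = true
  · rw [if_pos g6]; try rw [if_pos g6]
    simp only [Option.none_or, Option.some_or]
  rw [if_neg g6]; try rw [if_neg g6]
  by_cases g7 : (["cold", "flu", "runny nose", "congestion"]).any (fun k => PySem.Str.isIn k m) = true
  · rw [if_pos g7]; try rw [if_pos g7]
    simp only [Option.none_or, Option.some_or]
  rw [if_neg g7]; try rw [if_neg g7]
  by_cases g8 : (["stomach", "nausea", "vomit", "diarrhea"]).any (fun k => PySem.Str.isIn k m) = true
  · rw [if_pos g8]; try rw [if_pos g8]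
    simp only [Option.none_or, Option.some_or]
  rw [if_neg g8]; try rw [if_neg g8]
  by_cases g9 : (["sleep", "insomnia"]).any (fun k => PySem.Str.isIn k m) = true
  · rw [if_pos g9]; try rw [if_pos g9]
    simp only [Option.none_or, Option.some_or]
  rw [if_neg g9]; try rw [if_neg g9]
  by_cases g10 : (["allergy", "rash", "hives", "itchy"]).any (fun k => PySem.Str.isIn k m) = true
  · rw [if_pos g10]; try rw [if_pos g10]
    simp only [Option.none_or]
  rw [if_neg g10]; try rw [if_neg g10]
  simp only [Option.none_or]

lemma pvKey (m : String) :
    (if (["fever", "temperature", "feverish"]).any (fun k => PySem.Str.isIn k m) then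
      "For fever: rest, stay hydrated, and use OTC fever reducers like acetaminophen. If temperature exceeds 103°F or persists beyond 3 days, seek immediate medical attention."
    else if (["headache", "migraine", "head pain"]).any (fun k => PySem.Str.isIn k m) then
      "For headaches: rest in a dark quiet room, apply a cold compress, and stay hydrated. Severe or sudden headaches warrant a doctor visit."
    else if (["cough", "coughing"]).any (fun k => PySem.Str.isIn k m) then
      "For cough: stay hydrated, try honey in warm water. Persistent cough over 2 weeks or coughing blood requires medical evaluation."
    else if (["sore throat", "throat pain"]).any (fun k => PySem.Str.isIn k m) then
      "For sore throat: gargle warm salt water, stay hydrated, use lozenges. If it lasts over a week with fever, see a doctor."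
    else if (["chest pain", "heart", "palpitation"]).any (fun k => PySem.Str.isIn k m) then
      "EMERGENCY: Chest pain may indicate a cardiac event. Call 911 immediately. Do not drive yourself."
    else if (["anxiety", "stress", "panic"]).any (fun k => PySem.Str.isIn k m) then
      "For anxiety: practice deep breathing and mindfulness. If overwhelming or persistent, consult a mental health professional."
    else if (["diabetes", "blood sugar", "glucose"]).any (fun k => PySem.Str.isIn k m) then
      "For diabetes: monitor blood sugar regularly, follow your prescribed diet and medications. Consult your endocrinologist regularly."
    else if (["cold", "flu", "runny nose", "congestion"]).any (fun k => PySem.Str.isIn k m) then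
      "For cold/flu: rest, fluids, saline sprays. See a doctor if symptoms worsen or last over 10 days."
    else if (["stomach", "nausea", "vomit", "diarrhea"]).any (fun k => PySem.Str.isIn k m) then
      "For GI symptoms: sip clear fluids, rest. Seek help if symptoms persist over 48 hours or include blood."
    else if (["sleep", "insomnia"]).any (fun k => PySem.Str.isIn k m) then
      "For sleep issues: maintain a consistent schedule, avoid screens before bed. Persistent insomnia warrants a doctor visit."
    else if (["allergy", "rash", "hives", "itchy"]).any (fun k => PySem.Str.isIn k m) then
      "For allergies/rash: avoid triggers, use antihistamines. Severe reactions with throat swelling need emergency care."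
    else
      "I'm a responsible medical assistant. For specific symptoms, please consult a qualified healthcare professional. I cannot provide personalised medical diagnoses.")
    = (match PySem.List.min? (pvKeywordIndex.filterMap (pvF m)) (fun x => x) with
       | some i => pvAdvice.getD i pvDefaultAdvice
       | none => pvDefaultAdvice) := by
  rw [pvMinEqHead _ (pvMatchesSorted m), pvHeadChar]
  by_cases h0 : (["fever", "temperature", "feverish"]).any (fun k => PySem.Str.isIn k m) = true
  · rw [if_pos h0, if_pos h0]; rfl
  rw [if_neg h0, if_neg h0]
  by_cases h1 : (["headache", "migraine", "head pain"]).any (fun k => PySem.Str.isIn k m) = true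
  · rw [if_pos h1, if_pos h1]; rfl
  rw [if_neg h1, if_neg h1]
  by_cases h2 : (["cough", "coughing"]).any (fun k => PySem.Str.isIn k m) = true
  · rw [if_pos h2, if_pos h2]; rfl
  rw [if_neg h2, if_neg h2]
  by_cases h3 : (["sore throat", "throat pain"]).any (fun k => PySem.Str.isIn k m) = true
  · rw [if_pos h3, if_pos h3]; rfl
  rw [if_neg h3, if_neg h3]
  by_cases h4 : (["chest pain", "heart", "palpitation"]).any (fun k => PySem.Str.isIn k m) = true
  · rw [if_pos h4, if_pos h4]; rfl
  rw [if_neg h4, if_neg h4]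
  by_cases h5 : (["anxiety", "stress", "panic"]).any (fun k => PySem.Str.isIn k m) = true
  · rw [if_pos h5, if_pos h5]; rfl
  rw [if_neg h5, if_neg h5]
  by_cases h6 : (["diabetes", "blood sugar", "glucose"]).any (fun k => PySem.Str.isIn k m) = true
  · rw [if_pos h6, if_pos h6]; rfl
  rw [if_neg h6, if_neg h6]
  by_cases h7 : (["cold", "flu", "runny nose", "congestion"]).any (fun k => PySem.Str.isIn k m) = true
  · rw [if_pos h7, if_pos h7]; rfl
  rw [if_neg h7, if_neg h7]
  by_cases h8 : (["stomach", "nausea", "vomit", "diarrhea"]).any (fun k => PySem.Str.isIn k m) = true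
  · rw [if_pos h8, if_pos h8]; rfl
  rw [if_neg h8, if_neg h8]
  by_cases h9 : (["sleep", "insomnia"]).any (fun k => PySem.Str.isIn k m) = true
  · rw [if_pos h9, if_pos h9]; rfl
  rw [if_neg h9, if_neg h9]
  by_cases h10 : (["allergy", "rash", "hives", "itchy"]).any (fun k => PySem.Str.isIn k m) = true
  · rw [if_pos h10, if_pos h10]; rfl
  rw [if_neg h10, if_neg h10]; rfl

-- ===== VERDICT =====
theorem get_medical_advice_spec : Claim_equal_get_medical_advice := by
  intro msg _
  exact pvKey (PySem.Str.lower msg)
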